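-- pv_equiv track=rewrite | github.com/7Lancelot7/Trains_task | Min_Cost_Min_Time.py | matrixx
-- ===== SOURCE A (Python) =====
-- def matrixx(mas, vertex):
--     ans = {}
--     for i in vertex:
--         ans[i] = []
--     for i in vertex:
--         for j in mas:
--             if str(i) == j[1]:
--
--                 if int(j[2]) not in ans[i]:
--                     ans[i].append(int(j[2]))
--                     ans[i].sort()
--
--     return ans
-- ===== SOURCE B (Python) =====
-- def matrixx(mas, vertex):
--     if not vertex:
--         return {}
--     keys = {str(i) for i in vertex}
--     groups = {}
--     for j in mas:
--         if j[1] in keys: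
--             groups.setdefault(j[1], []).append(int(j[2]))
--     return {i: sorted(set(groups.get(str(i), []))) for i in vertex}
-- ===== Notes on version B (the rewrite author's own statement) =====
-- stated objective: faster
-- what changed: Instead of scanning all edges once per vertex and re-sorting the per-vertex list after every insertion, B groups edges by source label in one pass over the edge list and sorts each vertex's deduplicated weight set once.
import Mathlib
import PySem

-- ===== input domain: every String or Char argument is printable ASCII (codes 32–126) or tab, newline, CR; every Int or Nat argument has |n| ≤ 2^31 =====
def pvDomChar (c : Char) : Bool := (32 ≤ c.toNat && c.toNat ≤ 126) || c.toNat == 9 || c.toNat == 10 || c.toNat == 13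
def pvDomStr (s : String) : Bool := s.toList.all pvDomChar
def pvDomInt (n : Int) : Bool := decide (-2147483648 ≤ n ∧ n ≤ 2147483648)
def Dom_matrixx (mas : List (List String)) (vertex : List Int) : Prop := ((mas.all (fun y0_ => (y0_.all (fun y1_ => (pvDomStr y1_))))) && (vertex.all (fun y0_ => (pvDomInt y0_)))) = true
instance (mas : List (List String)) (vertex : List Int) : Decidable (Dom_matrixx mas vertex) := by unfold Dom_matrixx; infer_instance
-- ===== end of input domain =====

-- B groups the edges by source label in ONE pass and sorts each vertex's weight set once,
-- instead of A's per-vertex scan of all edges with a re-sort after every insertion.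

-- ===== PORT A =====
def matrixx (mas : List (List String)) (vertex : List Int) : List (Int × List Int) :=
  let ans0 : PySem.Dict Int (List Int) :=
    vertex.foldl (fun d i => d.insert i []) PySem.Dict.empty
  let ans :=
    vertex.foldl (fun d i =>
      mas.foldl (fun d j =>
        if PySem.Int.toStr i == PySem.List.pyGetD j 1 "" then
          if (PySem.Int.ofStr? (PySem.List.pyGetD j 2 "")).getD 0 ∈ d.getD i [] then d
          else d.insert i (PySem.List.sorted
            (d.getD i [] ++ [(PySem.Int.ofStr? (PySem.List.pyGetD j 2 "")).getD 0]) (fun x => x) false)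
        else d) d) ans0
  ans.items

-- ===== PORT B =====
def matrixx_alt (mas : List (List String)) (vertex : List Int) : List (Int × List Int) :=
  if vertex = [] then []
  else
    let keys : PySem.Set String := PySem.Set.ofList (vertex.map (fun i => PySem.Int.toStr i))
    let groups : PySem.Dict String (List Int) :=
      mas.foldl (fun g j =>
        if PySem.List.pyGetD j 1 "" ∈ keys then
          g.modify (PySem.List.pyGetD j 1 "") []
            (fun l => l ++ [(PySem.Int.ofStr? (PySem.List.pyGetD j 2 "")).getD 0])
        else g) PySem.Dict.empty
    (vertex.foldl (fun d i =>
        d.insert i (PySem.List.sorted (PySem.Set.ofList (groups.getD (PySem.Int.toStr i) []))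
          (fun x => x) false))
      PySem.Dict.empty).items

-- ===== PRECONDITION & SPEC =====
-- Pre_: exactly the inputs where Python A returns (it raises IndexError/ValueError when, with a
-- nonempty vertex list, a row lacks column 1, or a row matched by some vertex lacks a parseable column 2).
def Pre_matrixx (mas : List (List String)) (vertex : List Int) : Prop :=
  vertex = [] ∨ ∀ j ∈ mas, 2 ≤ j.length ∧
    ((∃ i ∈ vertex, PySem.Int.toStr i = PySem.List.pyGetD j 1 "") →
      3 ≤ j.length ∧ (PySem.Int.ofStr? (PySem.List.pyGetD j 2 "")).isSome)
instance (mas : List (List String)) (vertex : List Int) : Decidable (Pre_matrixx mas vertex) := by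
  unfold Pre_matrixx; infer_instance

def pvWitness_matrixx : List (List String) × List Int :=
  ([["a", "1", "5"], ["b", "2", "3"], ["c", "1", "4"], ["d", "1", "5"]], [1, 2, 1])

def Spec_matrixx (mas : List (List String)) (vertex : List Int) (out : List (Int × List Int)) : Prop := out = matrixx_alt mas vertex
instance (mas : List (List String)) (vertex : List Int) (out : List (Int × List Int)) : Decidable (Spec_matrixx mas vertex out) := by unfold Spec_matrixx; infer_instance

-- ===== CLAIM (what is proved, stated in full; the proofs are below) =====
def Claim_equal_matrixx : Prop := ∀ (mas : List (List String)) (vertex : List Int), Dom_matrixx mas vertex → Pre_matrixx mas vertex → Spec_matrixx mas vertex (matrixx mas vertex)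


-- ===== LEMMAS AND PROOFS =====

-- Proof-side abbreviations for the columns the ports read.
def pvKey (j : List String) : String := PySem.List.pyGetD j 1 ""
def pvVal (j : List String) : Int := (PySem.Int.ofStr? (PySem.List.pyGetD j 2 "")).getD 0

-- A dict whose items are exactly the keys S tagged by g (the shape both folds preserve).
def pvRep (S : List Int) (g : Int → List Int) : PySem.Dict Int (List Int) :=
  PySem.Dict.mk (S.map (fun k => (k, g k)))

-- One step of A's inner loop, on the per-vertex list and on the dict.
def pvLStep (i : Int) (l : List Int) (j : List String) : List Int :=
  if PySem.Int.toStr i == pvKey j then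
    if pvVal j ∈ l then l else PySem.List.sorted (l ++ [pvVal j]) (fun x => x) false
  else l
def pvDStep (i : Int) (d : PySem.Dict Int (List Int)) (j : List String) : PySem.Dict Int (List Int) :=
  if PySem.Int.toStr i == pvKey j then
    if pvVal j ∈ d.getD i [] then d
    else d.insert i (PySem.List.sorted (d.getD i [] ++ [pvVal j]) (fun x => x) false)
  else d

def pvF (mas : List (List String)) (i : Int) : List Int := mas.foldl (pvLStep i) []
def pvVals (mas : List (List String)) (i : Int) : List Int :=
  (mas.filter (fun j => PySem.Int.toStr i == pvKey j)).map pvVal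

def pvGroups (mas : List (List String)) (vertex : List Int) : PySem.Dict String (List Int) :=
  mas.foldl (fun g j =>
    if PySem.List.pyGetD j 1 "" ∈ PySem.Set.ofList (vertex.map (fun i => PySem.Int.toStr i)) then
      g.modify (PySem.List.pyGetD j 1 "") []
        (fun l => l ++ [(PySem.Int.ofStr? (PySem.List.pyGetD j 2 "")).getD 0])
    else g) PySem.Dict.empty
def pvG (mas : List (List String)) (vertex : List Int) (i : Int) : List Int :=
  PySem.List.sorted (PySem.Set.ofList ((pvGroups mas vertex).getD (PySem.Int.toStr i) []))
    (fun x => x) false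

lemma pv_matrixx_eq (mas : List (List String)) (vertex : List Int) :
    matrixx mas vertex =
      (vertex.foldl (fun d i => mas.foldl (pvDStep i) d)
        (vertex.foldl (fun d i => d.insert i []) PySem.Dict.empty)).items := rfl

lemma pv_matrixx_alt_eq (mas : List (List String)) (vertex : List Int) (hv : vertex ≠ []) :
    matrixx_alt mas vertex =
      (vertex.foldl (fun d i => d.insert i (pvG mas vertex i)) PySem.Dict.empty).items := by
  simp [matrixx_alt, hv, pvG, pvGroups]

lemma pv_keys_rep (S : List Int) (g : Int → List Int) : (pvRep S g).keys = S := by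
  simp [pvRep, PySem.Dict.keys, Function.comp_def]

lemma pv_insert_rep (S : List Int) (g : Int → List Int) (i : Int) (v : List Int) :
    (pvRep S g).insert i v = pvRep (PySem.Set.add S i) (Function.update g i v) := by
  apply PySem.Dict.ext
  rw [PySem.Dict.items_insert]
  have hc : (pvRep S g).contains i = decide (i ∈ S) := by
    rw [PySem.Dict.contains_eq_decide_mem_keys, pv_keys_rep]
  rw [hc]
  unfold pvRep PySem.Set.add
  by_cases h : i ∈ S
  · have hcon : PySem.Set.contains S i = true := by simpa [PySem.Set.contains] using h
    simp only [h, decide_true, if_true, hcon, List.map_map]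
    apply List.map_congr_left
    intro k hk
    by_cases hki : k = i
    · subst hki; simp
    · simp [hki]
  · have hcon : PySem.Set.contains S i = false := by simpa [PySem.Set.contains] using h
    simp only [h, decide_false, Bool.false_eq_true, if_false, hcon, List.map_append]
    congr 1
    · apply List.map_congr_left
      intro k hk
      have hki : k ≠ i := fun e => h (e ▸ hk)
      simp [Function.update_of_ne hki]
    · simp

lemma pv_getD_rep (S : List Int) (g : Int → List Int) (i : Int) (hn : S.Nodup) (h : i ∈ S) :
    (pvRep S g).getD i [] = g i := by
  have hmem : (i, g i) ∈ (pvRep S g).items := by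
    unfold pvRep
    exact List.mem_map.mpr ⟨i, h, rfl⟩
  have hk : (pvRep S g).keys.Nodup := by rw [pv_keys_rep]; exact hn
  exact PySem.Dict.getD_of_mem_items _ hmem hk []

lemma pv_bfold (G : Int → List Int) (vs S : List Int) :
    vs.foldl (fun d i => d.insert i (G i)) (pvRep S G) = pvRep (PySem.Set.update S vs) G := by
  induction vs generalizing S with
  | nil => rfl
  | cons i vs ih =>
    simp only [List.foldl_cons]
    rw [pv_insert_rep, Function.update_eq_self]
    exact ih (PySem.Set.add S i)

lemma pv_inner_rep (mas : List (List String)) (i : Int) (S : List Int) (g : Int → List Int)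
    (hn : S.Nodup) (h : i ∈ S) :
    mas.foldl (pvDStep i) (pvRep S g) =
      pvRep S (Function.update g i (mas.foldl (pvLStep i) (g i))) := by
  induction mas generalizing g with
  | nil => simp [Function.update_eq_self]
  | cons j mas ih =>
    have hg : (pvRep S g).getD i [] = g i := pv_getD_rep S g i hn h
    have hadd : PySem.Set.add S i = S := by
      simp [PySem.Set.add, PySem.Set.contains, h]
    simp only [List.foldl_cons]
    have hstep : pvDStep i (pvRep S g) j = pvRep S (Function.update g i (pvLStep i (g i) j)) := by
      unfold pvDStep pvLStep
      rw [hg]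
      split_ifs with h1 h2
      · rw [Function.update_eq_self]
      · rw [pv_insert_rep, hadd]
      · rw [Function.update_eq_self]
    rw [hstep, ih (Function.update g i (pvLStep i (g i) j))]
    rw [Function.update_idem, Function.update_self]

lemma pv_phase2 (mas : List (List String)) (vs S : List Int) (g : Int → List Int)
    (hn : S.Nodup) (hsub : ∀ i ∈ vs, i ∈ S) :
    vs.foldl (fun d i => mas.foldl (pvDStep i) d) (pvRep S g) =
      pvRep S (vs.foldl (fun g i => Function.update g i (mas.foldl (pvLStep i) (g i))) g) := by
  induction vs generalizing g with
  | nil => rfl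
  | cons i vs ih =>
    simp only [List.foldl_cons]
    rw [pv_inner_rep mas i S g hn (hsub i (List.mem_cons_self))]
    exact ih _ (fun x hx => hsub x (List.mem_cons_of_mem i hx))

lemma pv_lstep_pairwise (i : Int) (l : List Int) (j : List String)
    (h : l.Pairwise (· < ·)) : (pvLStep i l j).Pairwise (· < ·) := by
  unfold pvLStep
  split_ifs with h1 h2
  · exact h
  · have hnd : (l ++ [pvVal j]).Nodup := by
      have : l.Nodup := h.imp (fun hlt => ne_of_lt hlt)
      simp [List.nodup_append, this]
      exact fun a ha e => h2 (e ▸ ha)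
    have hperm := PySem.List.sorted_perm (l ++ [pvVal j]) (fun x => x) false
    have hnd' : (PySem.List.sorted (l ++ [pvVal j]) (fun x => x) false).Nodup :=
      hperm.nodup_iff.mpr hnd
    have hle := PySem.List.sorted_pairwise (l ++ [pvVal j]) (fun x => x)
    exact (hle.and hnd').imp (fun hp => lt_of_le_of_ne hp.1 hp.2)
  · exact h

lemma pv_lstep_toFinset (i : Int) (l : List Int) (j : List String) :
    (pvLStep i l j).toFinset =
      l.toFinset ∪ (if PySem.Int.toStr i == pvKey j then {pvVal j} else ∅) := by
  unfold pvLStep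
  split_ifs with h1 h2
  · have hsub : ({pvVal j} : Finset Int) ⊆ l.toFinset := by simpa using h2
    rw [Finset.union_eq_left.mpr hsub]
  · have hperm := PySem.List.sorted_perm (l ++ [pvVal j]) (fun x => x) false
    rw [List.toFinset_eq_of_perm _ _ hperm]
    simp
  · simp

lemma pv_inner_char (mas : List (List String)) (i : Int) (acc : List Int)
    (h : acc.Pairwise (· < ·)) :
    (mas.foldl (pvLStep i) acc).Pairwise (· < ·) ∧
      (mas.foldl (pvLStep i) acc).toFinset = acc.toFinset ∪ (pvVals mas i).toFinset := by
  induction mas generalizing acc with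
  | nil => exact ⟨h, by simp [pvVals]⟩
  | cons j mas ih =>
    simp only [List.foldl_cons]
    have hp := pv_lstep_pairwise i acc j h
    refine ⟨(ih _ hp).1, ?_⟩
    rw [(ih _ hp).2, pv_lstep_toFinset]
    have hvals : pvVals (j :: mas) i =
        if (PySem.Int.toStr i == pvKey j) = true then pvVal j :: pvVals mas i else pvVals mas i := by
      simp only [pvVals, List.filter_cons]
      split_ifs <;> simp_all
    rw [hvals]
    split_ifs with hc <;> · ext a; simp; try tauto

lemma pv_uniq (l l' : List Int) (h : l.Pairwise (· < ·)) (h' : l'.Pairwise (· < ·))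
    (hf : l.toFinset = l'.toFinset) : l = l' := by
  have hnd : l.Nodup := h.imp (fun hlt => ne_of_lt hlt)
  have hnd' : l'.Nodup := h'.imp (fun hlt => ne_of_lt hlt)
  have hperm : l.Perm l' := List.perm_of_nodup_nodup_toFinset_eq hnd hnd' hf
  have h1 : PySem.List.sorted l' (fun x => x) = l :=
    PySem.List.sorted_eq_of_perm_of_pairwise_lt l' l (fun x => x) hperm h
  have h2 : PySem.List.sorted l' (fun x => x) = l' :=
    PySem.List.sorted_eq_self_of_pairwise l' (fun x => x) (h'.imp (fun hlt => le_of_lt hlt))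
  rw [← h1, h2]

lemma pv_gf_main (mas : List (List String)) (vs : List Int) (g : Int → List Int)
    (hg : ∀ x, g x = [] ∨ g x = pvF mas x) (x : Int) (hx : x ∈ vs ∨ g x = pvF mas x) :
    vs.foldl (fun g i => Function.update g i (mas.foldl (pvLStep i) (g i))) g x = pvF mas x := by
  induction vs generalizing g with
  | nil =>
    rcases hx with h | h
    · simp at h
    · simpa using h
  | cons i vs ih =>
    simp only [List.foldl_cons]
    have hstep : mas.foldl (pvLStep i) (g i) = pvF mas i := by
      have hF := pv_inner_char mas i [] List.Pairwise.nil
      rcases hg i with h | h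
      · rw [h]; rfl
      · rw [h]
        have h2 := pv_inner_char mas i (pvF mas i) hF.1
        apply pv_uniq _ _ h2.1 hF.1
        rw [h2.2]
        have hFt : (pvF mas i).toFinset = (pvVals mas i).toFinset := by
          simpa [pvF] using hF.2
        rw [hFt, Finset.union_self]
        exact hFt.symm
    rw [hstep]
    apply ih
    · intro y
      by_cases hy : y = i
      · subst hy; right; rw [Function.update_self]
      · rw [Function.update_of_ne hy]; exact hg y
    · rcases hx with h | h
      · rcases List.mem_cons.mp h with rfl | h2
        · right; rw [Function.update_self]
        · left; exact h2
      · by_cases hy : x = i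
        · subst hy; right; rw [Function.update_self]
        · right; rw [Function.update_of_ne hy]; exact h

lemma pv_groups_getD (mas : List (List String)) (vertex : List Int) (i : Int) (hi : i ∈ vertex) :
    (pvGroups mas vertex).getD (PySem.Int.toStr i) [] = pvVals mas i := by
  unfold pvGroups
  have hmap :
      mas.foldl
        (fun g j =>
          if PySem.List.pyGetD j 1 "" ∈ PySem.Set.ofList (vertex.map (fun i => PySem.Int.toStr i)) then
            g.modify (PySem.List.pyGetD j 1 "")
              [] (fun l => l ++ [(PySem.Int.ofStr? (PySem.List.pyGetD j 2 "")).getD 0])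
          else g) PySem.Dict.empty
      = ((mas.filter (fun j => decide (PySem.List.pyGetD j 1 "" ∈
          PySem.Set.ofList (vertex.map (fun i => PySem.Int.toStr i))))).map
            (fun j => (PySem.List.pyGetD j 1 "", (PySem.Int.ofStr? (PySem.List.pyGetD j 2 "")).getD 0))).foldl
          (fun d p => d.modify p.1 [] (fun l => l ++ [p.2])) PySem.Dict.empty := by
    rw [List.foldl_map]
    exact PySem.List.foldl_ite_eq_foldl_filter
      (fun j => PySem.List.pyGetD j 1 "" ∈ PySem.Set.ofList (vertex.map (fun i => PySem.Int.toStr i)))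
      (fun g j => g.modify (PySem.List.pyGetD j 1 "")
        [] (fun l => l ++ [(PySem.Int.ofStr? (PySem.List.pyGetD j 2 "")).getD 0]))
      mas PySem.Dict.empty
  rw [hmap, PySem.Dict.getD_foldl_modify_append]
  rw [PySem.Dict.getD_empty, List.filter_map, List.map_map, List.filter_filter]
  show List.map _ _ = List.map _ _
  congr 1
  apply List.filter_congr
  intro j hj
  by_cases hk : PySem.List.pyGetD j 1 "" = PySem.Int.toStr i
  · have hmem : PySem.List.pyGetD j 1 "" ∈ PySem.Set.ofList (vertex.map (fun i => PySem.Int.toStr i)) := by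
      rw [PySem.Set.mem_ofList, hk]
      exact List.mem_map.mpr ⟨i, hi, rfl⟩
    simp [pvKey, hk]
    exact ⟨i, hi, rfl⟩
  · have hk' : PySem.Int.toStr i ≠ PySem.List.pyGetD j 1 "" := fun e => hk e.symm
    have b1 : (PySem.List.pyGetD j 1 "" == PySem.Int.toStr i) = false := by
      simpa using hk
    have b2 : (PySem.Int.toStr i == PySem.List.pyGetD j 1 "") = false := by
      simpa using hk'
    simp only [Function.comp_apply, pvKey, b1, b2, Bool.false_and]

lemma pv_pvG_eq_pvF (mas : List (List String)) (vertex : List Int) (i : Int) (hi : i ∈ vertex) :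
    pvG mas vertex i = pvF mas i := by
  unfold pvG
  rw [pv_groups_getD mas vertex i hi]
  have hS := PySem.List.sorted_ofList_pairwise_lt (pvVals mas i)
  have hF := pv_inner_char mas i [] List.Pairwise.nil
  apply pv_uniq _ _ hS hF.1
  have hperm := PySem.List.sorted_perm (PySem.Set.ofList (pvVals mas i)) (fun x => x) false
  rw [List.toFinset_eq_of_perm _ _ hperm]
  have h1 : (PySem.Set.ofList (pvVals mas i)).toFinset = (pvVals mas i).toFinset := by
    ext a
    simp [PySem.Set.mem_ofList]
  rw [h1, hF.2]
  simp

-- ===== VERDICT (by name: the statement is the Claim_ definition above) =====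
theorem matrixx_spec : Claim_equal_matrixx := by
  intro mas vertex _ _
  show matrixx mas vertex = matrixx_alt mas vertex
  by_cases hv : vertex = []
  · subst hv; rfl
  · rw [pv_matrixx_eq, pv_matrixx_alt_eq mas vertex hv]
    have h0 : (PySem.Dict.empty : PySem.Dict Int (List Int)) = pvRep [] (fun _ => []) := rfl
    have h0' : (PySem.Dict.empty : PySem.Dict Int (List Int)) = pvRep [] (pvG mas vertex) := rfl
    have hS : (PySem.Set.update ([] : List Int) vertex) = PySem.Set.ofList vertex :=
      (PySem.Set.ofList_eq_foldl vertex).symm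
    have hnd : (PySem.Set.ofList vertex).Nodup := PySem.Set.nodup_ofList vertex
    have hmem : ∀ i ∈ PySem.Set.ofList vertex, i ∈ vertex := by
      intro i hi; exact (PySem.Set.mem_ofList vertex i).mp hi
    -- A side
    have ph1 : vertex.foldl (fun d i => d.insert i ([] : List Int)) PySem.Dict.empty
        = pvRep (PySem.Set.ofList vertex) (fun _ => []) := by
      rw [h0]
      have := pv_bfold (fun _ => ([] : List Int)) vertex []
      rw [hS] at this
      exact this
    rw [ph1, pv_phase2 mas vertex _ _ hnd (fun i hi => (PySem.Set.mem_ofList vertex i).mpr hi)]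
    -- B side
    have phB : vertex.foldl (fun d i => d.insert i (pvG mas vertex i)) PySem.Dict.empty
        = pvRep (PySem.Set.ofList vertex) (pvG mas vertex) := by
      rw [h0']
      have := pv_bfold (pvG mas vertex) vertex []
      rw [hS] at this
      exact this
    rw [phB]
    show ((PySem.Set.ofList vertex).map _ ) = ((PySem.Set.ofList vertex).map _)
    apply List.map_congr_left
    intro k hk
    have hkv : k ∈ vertex := hmem k hk
    have hA : (vertex.foldl (fun g i => Function.update g i (mas.foldl (pvLStep i) (g i)))
        (fun _ => []) : Int → List Int) k = pvF mas k :=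
      pv_gf_main mas vertex _ (fun x => Or.inl rfl) k (Or.inl hkv)
    rw [hA, pv_pvG_eq_pvF mas vertex k hkv]
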